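-- pv_equiv track=rewrite | github.com/bebe-acme/monitorator | src/monitorator/tui/sprites.py | _translate_grid
-- ===== SOURCE A (Python) =====
-- _GRID_ROWS = 10
--
-- _GRID_COLS = 12
--
-- def _translate_grid(grid: list[list[int]], dx: int, dy: int) -> list[list[int]]:
--     """Translate entire sprite grid by (dx, dy) pixels, filling gaps with transparent."""
--     result = [row[:] for row in grid]
--     if dx < 0:
--         n = min(-dx, _GRID_COLS)
--         result = [row[n:] + [0] * n for row in result]
--     elif dx > 0:
--         n = min(dx, _GRID_COLS)
--         result = [[0] * n + row[:-n] for row in result]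
--     if dy < 0:
--         n = min(-dy, _GRID_ROWS)
--         result = result[n:] + [[0] * _GRID_COLS for _ in range(n)]
--     elif dy > 0:
--         n = min(dy, _GRID_ROWS)
--         result = [[0] * _GRID_COLS for _ in range(n)] + result[:-n]
--     return result
-- ===== SOURCE B (Python) =====
-- _GRID_ROWS = 10
--
-- _GRID_COLS = 12
--
-- def _shift(xs, d, fill):
--     """Shift xs by d places (positive = toward the back), one step at a time,
--     filling the vacated place with ``fill``."""
--     if d == 0:
--         return list(xs)
--     if d > 0:
--         return [fill] + _shift(xs[:-1], d - 1, fill)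
--     return _shift(xs[1:], d + 1, fill) + [fill]
--
-- def _translate_grid(grid: list[list[int]], dx: int, dy: int) -> list[list[int]]:
--     """Translate entire sprite grid by (dx, dy) pixels, filling gaps with transparent."""
--     sx = max(-_GRID_COLS, min(dx, _GRID_COLS))
--     sy = max(-_GRID_ROWS, min(dy, _GRID_ROWS))
--     return _shift([_shift(row, sx, 0) for row in grid], sy, [0] * _GRID_COLS)
-- ===== Notes on version B (the rewrite author's own statement) =====
-- stated objective: alternative
-- what changed: Replaced A's slice-and-concatenate passes (per-row horizontal slicing, then list-level vertical slicing with fixed fill blocks) by one generic recursive one-step shift applied first to every row and then to the row list.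
import Mathlib
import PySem

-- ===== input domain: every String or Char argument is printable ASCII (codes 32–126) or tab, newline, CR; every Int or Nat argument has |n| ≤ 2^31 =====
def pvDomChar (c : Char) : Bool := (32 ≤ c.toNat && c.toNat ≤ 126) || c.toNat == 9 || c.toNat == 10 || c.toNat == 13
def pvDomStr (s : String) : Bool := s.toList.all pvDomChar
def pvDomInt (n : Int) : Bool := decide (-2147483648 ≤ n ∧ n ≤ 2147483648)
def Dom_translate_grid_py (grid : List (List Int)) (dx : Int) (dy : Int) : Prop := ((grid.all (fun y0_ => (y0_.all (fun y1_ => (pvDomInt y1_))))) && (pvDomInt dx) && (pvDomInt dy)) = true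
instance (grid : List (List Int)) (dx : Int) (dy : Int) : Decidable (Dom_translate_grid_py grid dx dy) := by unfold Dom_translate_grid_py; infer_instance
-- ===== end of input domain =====

-- B replaces A's slice-and-concatenate passes by one generic recursive one-step shift used for both axes (objective: alternative decomposition).

-- ===== PORT A =====
-- A-side helper: the copy plus the horizontal (dx) stage of _translate_grid, line for line
def pvAhoriz (grid : List (List Int)) (dx : Int) : List (List Int) :=
  let result := grid.map (fun row => PySem.List.slice row none none)      -- row[:]
  if dx < 0 then
    let n := min (-dx) 12
    result.map (fun row => PySem.List.slice row (some n) none ++ List.replicate n.toNat 0)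
  else if dx > 0 then
    let n := min dx 12
    result.map (fun row => List.replicate n.toNat 0 ++ PySem.List.slice row none (some (-n)))
  else result

-- literal transliteration of _translate_grid: horizontal stage, then the vertical (dy) stage
def translate_grid_py (grid : List (List Int)) (dx : Int) (dy : Int) : List (List Int) :=
  let result := pvAhoriz grid dx
  if dy < 0 then
    let n := min (-dy) 10
    PySem.List.slice result (some n) none ++ (List.range n.toNat).map (fun _ => List.replicate 12 0)
  else if dy > 0 then
    let n := min dy 10
    (List.range n.toNat).map (fun _ => List.replicate 12 0) ++ PySem.List.slice result none (some (-n))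
  else result

-- ===== PORT B =====
-- B-side helper: _shift of Source B — shift by d one step at a time
-- (xs[:-1] is List.dropLast and xs[1:] is List.tail: exact for every list, including [])
def pvShift {α : Type} (xs : List α) (d : Int) (fill : α) : List α :=
  if d = 0 then xs
  else if d > 0 then fill :: pvShift xs.dropLast (d - 1) fill
  else pvShift xs.tail (d + 1) fill ++ [fill]
termination_by d.natAbs
decreasing_by all_goals omega

-- literal transliteration of Source B's _translate_grid: clamp, shift the rows, shift the row list
def translate_grid_py_alt (grid : List (List Int)) (dx : Int) (dy : Int) : List (List Int) :=
  let sx := max (-12) (min dx 12)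
  let sy := max (-10) (min dy 10)
  pvShift (grid.map (fun row => pvShift row sx 0)) sy (List.replicate 12 0)

-- ===== PRECONDITION & SPEC =====
def Spec_translate_grid_py (grid : List (List Int)) (dx : Int) (dy : Int) (out : List (List Int)) : Prop := out = translate_grid_py_alt grid dx dy
instance (grid : List (List Int)) (dx : Int) (dy : Int) (out : List (List Int)) : Decidable (Spec_translate_grid_py grid dx dy out) := by unfold Spec_translate_grid_py; infer_instance

-- ===== CLAIM (what is proved, stated in full; the proofs are below) =====
def Claim_equal_translate_grid_py : Prop := ∀ (grid : List (List Int)) (dx : Int) (dy : Int), Dom_translate_grid_py grid dx dy → Spec_translate_grid_py grid dx dy (translate_grid_py grid dx dy)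

-- ===== LEMMAS AND PROOFS =====

lemma pvShift_zero {α : Type} (xs : List α) (fill : α) : pvShift xs 0 fill = xs := by
  rw [pvShift]; simp

-- a backward shift by n is Python's  xs[n:] + [fill]*n
lemma pvShift_neg {α : Type} (n : Nat) (xs : List α) (fill : α) :
    pvShift xs (-(n : Int)) fill = xs.drop n ++ List.replicate n fill := by
  induction n generalizing xs with
  | zero => rw [pvShift]; simp
  | succ k ih =>
    rw [pvShift, if_neg (by omega), if_neg (by omega)]
    have hstep : (-(↑(k + 1) : Int) + 1) = -(k : Int) := by push_cast; ring
    rw [hstep, ih]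
    rw [← List.drop_one, List.drop_drop, List.replicate_succ']
    simp [List.append_assoc, Nat.add_comm 1 k]

-- a forward shift by n is Python's  [fill]*n + xs[:-n]
lemma pvShift_pos {α : Type} (n : Nat) (xs : List α) (fill : α) :
    pvShift xs ((n : Int)) fill = List.replicate n fill ++ xs.take (xs.length - n) := by
  induction n generalizing xs with
  | zero => rw [pvShift]; simp
  | succ k ih =>
    rw [pvShift, if_neg (by omega), if_pos (by omega)]
    have hstep : ((↑(k + 1) : Int) - 1) = (k : Int) := by push_cast; ring
    rw [hstep, ih]
    rw [List.dropLast_eq_take, List.take_take, List.length_take]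
    have h1 : min (min (xs.length - 1) xs.length - k) (xs.length - 1) = xs.length - (k + 1) := by omega
    rw [h1, List.replicate_succ]
    simp

-- ===== VERDICT (by name: the statement is the Claim_ definition above) =====
theorem translate_grid_py_spec : Claim_equal_translate_grid_py := by
  intro grid dx dy _
  show translate_grid_py grid dx dy = translate_grid_py_alt grid dx dy
  unfold translate_grid_py translate_grid_py_alt
  -- the horizontal stage is the clamped row shift
  have hH : pvAhoriz grid dx = grid.map (fun row => pvShift row (max (-12) (min dx 12)) 0) := by
    unfold pvAhoriz
    simp only [PySem.List.slice_none_none, List.map_id']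
    rcases lt_trichotomy dx 0 with h | h | h
    · rw [if_pos h]
      set m : Nat := (min (-dx) 12).toNat with hmdef
      have hm : min (-dx) 12 = (m : Int) := by omega
      have hsx : max (-12) (min dx 12) = -(m : Int) := by omega
      simp only [hm, hsx, PySem.List.slice_from_natCast]
      exact List.map_congr_left (fun row _ => (pvShift_neg m row 0).symm)
    · subst h
      rw [if_neg (by omega), if_neg (by omega)]
      simp [pvShift_zero]
    · rw [if_neg (by omega), if_pos h]
      set m : Nat := (min dx 12).toNat with hmdef
      have hm : min dx 12 = (m : Int) := by omega
      have hm1 : 0 < m := by omega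
      have hsx : max (-12) ((m : Int)) = (m : Int) := by omega
      simp only [hm, hsx]
      refine List.map_congr_left (fun row _ => ?_)
      rw [PySem.List.slice_to_neg_natCast row m hm1]
      exact (pvShift_pos m row 0).symm
  rw [hH]
  set hgrid := grid.map (fun row => pvShift row (max (-12) (min dx 12)) 0) with hgdef
  -- the vertical stage is the clamped row-list shift
  rcases lt_trichotomy dy 0 with h | h | h
  · rw [if_pos h]
    set m : Nat := (min (-dy) 10).toNat with hmdef
    have hm : min (-dy) 10 = (m : Int) := by omega
    have hsy : max (-10) (min dy 10) = -(m : Int) := by omega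
    simp only [hm, hsy, PySem.List.slice_from_natCast, Int.toNat_natCast,
      List.map_const', List.length_range]
    exact (pvShift_neg m hgrid (List.replicate 12 0)).symm
  · subst h
    rw [if_neg (by omega), if_neg (by omega)]
    have hsy : max (-10 : Int) (min 0 10) = 0 := by omega
    rw [hsy, pvShift_zero]
  · rw [if_neg (by omega), if_pos h]
    set m : Nat := (min dy 10).toNat with hmdef
    have hm : min dy 10 = (m : Int) := by omega
    have hm1 : 0 < m := by omega
    have hsy : max (-10) ((m : Int)) = (m : Int) := by omega
    simp only [hm, hsy, List.map_const', List.length_range]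
    rw [PySem.List.slice_to_neg_natCast hgrid m hm1]
    exact (pvShift_pos m hgrid (List.replicate 12 0)).symm
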